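-- pv_equiv track=rewrite | github.com/sebastien-bugzilla/pdf2score | portees/pdf2score_portees.py | vecteurRateau
-- ===== SOURCE A (Python) =====
-- def vecteurRateau(ecart):
--     Vecteur=[]
--     for j in range(4):
--         for i in range(3):
--             Vecteur.append(1)
--         for i in range(ecart-3):
--             Vecteur.append(0)
--     for i in range(3):
--         Vecteur.append(1)
--     return Vecteur
-- ===== SOURCE B (Python) =====
-- def vecteurRateau(ecart):
--     blk = max(ecart, 3)
--     return [1 if i % blk < 3 else 0 for i in range(4 * blk + 3)]
-- ===== Notes on version B (the rewrite author's own statement) =====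
-- stated objective: simpler
-- what changed: Replaces the nested block-building loops (four times: three appended 1s then ecart-3 appended 0s, plus a trailing triple of 1s) by one flat comprehension over range(4*blk+3) with blk=max(ecart,3), deciding each element by the modular test i % blk < 3.
import Mathlib
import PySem

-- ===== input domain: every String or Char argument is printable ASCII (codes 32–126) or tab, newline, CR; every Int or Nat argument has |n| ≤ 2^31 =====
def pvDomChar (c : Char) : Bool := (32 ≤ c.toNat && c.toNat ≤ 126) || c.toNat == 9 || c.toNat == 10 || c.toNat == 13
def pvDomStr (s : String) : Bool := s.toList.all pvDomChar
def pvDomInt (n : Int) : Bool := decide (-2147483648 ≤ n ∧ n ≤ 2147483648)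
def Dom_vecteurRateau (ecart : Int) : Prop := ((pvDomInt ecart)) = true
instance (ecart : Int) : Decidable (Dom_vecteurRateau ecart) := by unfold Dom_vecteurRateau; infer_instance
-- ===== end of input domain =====

-- B replaces A's nested block-building loops by one flat pass deciding element i by i % max(ecart,3) < 3 (simpler decomposition, same cost).

-- ===== PORT A =====
def vecteurRateau (ecart : Int) : List Int :=
  let Vecteur : List Int := []
  let Vecteur := (PySem.List.pyRange 0 4 1).foldl (fun V _ =>
      let V := (PySem.List.pyRange 0 3 1).foldl (fun V _ => V ++ [(1 : Int)]) V
      (PySem.List.pyRange 0 (ecart - 3) 1).foldl (fun V _ => V ++ [(0 : Int)]) V) Vecteur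
  (PySem.List.pyRange 0 3 1).foldl (fun V _ => V ++ [(1 : Int)]) Vecteur

-- ===== PORT B =====
def vecteurRateau_alt (ecart : Int) : List Int :=
  let blk := max ecart 3
  (PySem.List.pyRange 0 (4 * blk + 3) 1).map (fun i => if PySem.Int.mod i blk < 3 then (1 : Int) else 0)

-- ===== PRECONDITION & SPEC =====
def Spec_vecteurRateau (ecart : Int) (out : List Int) : Prop := out = vecteurRateau_alt ecart
instance (ecart : Int) (out : List Int) : Decidable (Spec_vecteurRateau ecart out) := by unfold Spec_vecteurRateau; infer_instance

-- ===== CLAIM (what is proved, stated in full; the proofs are below) =====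
def Claim_equal_vecteurRateau : Prop := ∀ (ecart : Int), Dom_vecteurRateau ecart → Spec_vecteurRateau ecart (vecteurRateau ecart)

-- ===== LEMMAS AND PROOFS =====

-- common closed form: four blocks ([1,1,1] ++ n zeros) then a trailing [1,1,1] (right-nested appends)
def pvBlock (n : Nat) : List Int := [1, 1, 1] ++ List.replicate n 0
def pvCF (n : Nat) : List Int := pvBlock n ++ (pvBlock n ++ (pvBlock n ++ (pvBlock n ++ [1, 1, 1])))
def pvG (n : Nat) (k : Nat) : Int := if k % (n + 3) < 3 then 1 else 0

lemma pvPyRange_zero (m : Int) :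
    PySem.List.pyRange 0 m 1 = (List.range m.toNat).map (fun k : Nat => (k : Int)) := by
  by_cases h : 0 ≤ m
  · conv_lhs => rw [← Int.toNat_of_nonneg h]
    exact PySem.List.pyRange_zero_natCast m.toNat
  · have h0 : m.toNat = 0 := Int.toNat_of_nonpos (by omega)
    rw [h0]
    simp [PySem.List.pyRange]
    omega

lemma pvFoldl_const_append {α : Type} (c : Int) (l : List α) (V : List Int) :
    List.foldl (fun V _ => V ++ [c]) V l = V ++ List.replicate l.length c := by
  rw [PySem.List.foldl_append_singleton_eq_map (fun _ => c) l V]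
  simp

lemma pvA_eq (ecart : Int) : vecteurRateau ecart = pvCF (ecart - 3).toNat := by
  have h4 : PySem.List.pyRange 0 4 1 = [0, 1, 2, 3] := by decide
  have h3 : PySem.List.pyRange 0 3 1 = [0, 1, 2] := by decide
  have hz : ∀ (V : List Int),
      List.foldl (fun V (_ : Int) => V ++ [(0 : Int)]) V (PySem.List.pyRange 0 (ecart - 3) 1)
        = V ++ List.replicate (ecart - 3).toNat 0 := by
    intro V
    rw [pvPyRange_zero, pvFoldl_const_append]
    simp
  simp only [vecteurRateau, h4, h3, List.foldl, hz]
  simp [pvCF, pvBlock, List.append_assoc]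

lemma pvRange_triple (n : Nat) : (List.range 3).map (pvG n) = [1, 1, 1] := by
  have e0 : (0 : Nat) % (n + 3) = 0 := Nat.mod_eq_of_lt (by omega)
  have e1 : (1 : Nat) % (n + 3) = 1 := Nat.mod_eq_of_lt (by omega)
  have e2 : (2 : Nat) % (n + 3) = 2 := Nat.mod_eq_of_lt (by omega)
  simp [List.range_succ, pvG, e0, e1, e2]

lemma pvRange_shift (n m : Nat) :
    (List.range ((n + 3) + m)).map (pvG n)
      = (List.range (n + 3)).map (pvG n) ++ (List.range m).map (pvG n) := by
  rw [List.range_add, List.map_append, List.map_map]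
  congr 1
  apply List.map_congr_left
  intro x _
  simp [Function.comp, pvG, Nat.add_mod_left]

lemma pvRange_block (n : Nat) : (List.range (n + 3)).map (pvG n) = pvBlock n := by
  have htail : (List.range n).map (pvG n ∘ (fun x => 3 + x)) = List.replicate n 0 := by
    calc (List.range n).map (pvG n ∘ (fun x => 3 + x))
        = (List.range n).map (fun _ => (0 : Int)) := by
          apply List.map_congr_left
          intro x hx
          have hlt : x < n := List.mem_range.mp hx
          have hmod : (3 + x) % (n + 3) = 3 + x := Nat.mod_eq_of_lt (by omega)
          simp [Function.comp, pvG, hmod]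
      _ = List.replicate n 0 := by simp [List.map_const']
  rw [show n + 3 = 3 + n from by omega, List.range_add, List.map_append, List.map_map,
      pvRange_triple, htail]
  rfl

lemma pvRange_mod (n : Nat) :
    (List.range (4 * (n + 3) + 3)).map (pvG n) = pvCF n := by
  rw [show 4 * (n + 3) + 3 = (n + 3) + ((n + 3) + ((n + 3) + ((n + 3) + 3))) from by ring]
  rw [pvRange_shift, pvRange_shift, pvRange_shift, pvRange_shift, pvRange_block, pvRange_triple]
  rfl

lemma pvB_eq (ecart : Int) : vecteurRateau_alt ecart = pvCF (ecart - 3).toNat := by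
  set n := (ecart - 3).toNat with hn
  have hblk : max ecart 3 = ((n + 3 : Nat) : Int) := by
    rcases le_total ecart 3 with h | h
    · rw [max_eq_right h]; omega
    · rw [max_eq_left h]; omega
  have hlen : 4 * ((n + 3 : Nat) : Int) + 3 = ((4 * (n + 3) + 3 : Nat) : Int) := by push_cast; ring
  simp only [vecteurRateau_alt, hblk, hlen, PySem.List.pyRange_zero_natCast, List.map_map]
  rw [← pvRange_mod n]
  apply List.map_congr_left
  intro k _
  have hcond : (((k % (n + 3) : Nat) : Int) < 3) ↔ (k % (n + 3) < 3) := by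
    omega
  simp only [Function.comp, PySem.Int.mod_natCast, pvG, hcond]

-- ===== VERDICT (by name: the statement is the Claim_ definition above) =====
theorem vecteurRateau_spec : Claim_equal_vecteurRateau := by
  intro ecart _
  unfold Spec_vecteurRateau
  rw [pvA_eq, pvB_eq]
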